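-- pv_equiv track=rewrite | github.com/mqzpt/koalatype | main.py | _layout_prompt
-- ===== SOURCE A (Python) =====
-- def _layout_prompt(prompt: str, width: int) -> tuple[list[str], list[tuple[int, int]]]:
--     lines: list[str] = []
--     positions: list[tuple[int, int]] = []
--     row = 0
--     col = 0
--     current_line: list[str] = []
--
--     words = prompt.split(" ")
--
--     for word_idx, word in enumerate(words):
--         word_len = len(word)
--         space_len = 1 if col > 0 else 0
--
--         if col > 0 and col + space_len + word_len > width:
--             lines.append("".join(current_line))
--             current_line = []
--             row += 1
--             col = 0
--             positions.append((row, col))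
--
--         if col > 0:
--             current_line.append(" ")
--             positions.append((row, col))
--             col += 1
--
--         for ch in word:
--             current_line.append(ch)
--             positions.append((row, col))
--             col += 1
--
--     if current_line or not lines:
--         lines.append("".join(current_line))
--
--     return lines, positions
-- ===== SOURCE B (Python) =====
-- def _layout_prompt(prompt: str, width: int) -> tuple[list[str], list[tuple[int, int]]]:
--     words = prompt.split(" ")
--
--     # Pass 1: pure line-breaking — for each word record (wrapped, spaced, row, start_col).
--     recs: list[tuple[bool, bool, int, int]] = []
--     row = 0
--     col = 0
--     for word in words:
--         wrapped = col > 0 and col + 1 + len(word) > width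
--         if wrapped:
--             row += 1
--             col = 0
--         spaced = col > 0
--         recs.append((wrapped, spaced, row, col))
--         col += (1 if spaced else 0) + len(word)
--
--     # Pass 2: consume the records to build the lines and the positions list.
--     lines: list[str] = []
--     positions: list[tuple[int, int]] = []
--     current: list[str] = []
--     for word, (wrapped, spaced, r, c0) in zip(words, recs):
--         if wrapped:
--             lines.append("".join(current))
--             current = []
--             positions.append((r, 0))
--         base = c0
--         if spaced:
--             current.append(" ")
--             positions.append((r, base))
--             base += 1
--         for i, ch in enumerate(word):
--             current.append(ch)
--             positions.append((r, base + i))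
--
--     if current or not lines:
--         lines.append("".join(current))
--     return lines, positions
-- ===== Notes on version B (the rewrite author's own statement) =====
-- stated objective: alternative
-- what changed: B replaces A's single loop that interleaves layout decisions with output building by two passes: a pure line-breaking pass producing per-word records (wrapped, spaced, row, start_col), then a rendering pass that consumes the records to build the lines and positions.
import Mathlib
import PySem

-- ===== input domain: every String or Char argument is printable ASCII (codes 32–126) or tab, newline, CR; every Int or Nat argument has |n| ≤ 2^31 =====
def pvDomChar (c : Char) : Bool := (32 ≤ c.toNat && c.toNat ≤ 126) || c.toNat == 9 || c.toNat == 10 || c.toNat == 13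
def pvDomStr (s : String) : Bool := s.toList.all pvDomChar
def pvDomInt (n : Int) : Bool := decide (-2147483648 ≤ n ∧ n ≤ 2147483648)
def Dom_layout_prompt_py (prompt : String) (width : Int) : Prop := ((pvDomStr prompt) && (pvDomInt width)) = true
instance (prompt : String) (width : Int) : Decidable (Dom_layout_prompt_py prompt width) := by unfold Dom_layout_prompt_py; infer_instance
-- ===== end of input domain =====

-- B splits the work into a line-breaking pass producing per-word records and a second pass
-- rendering lines/positions from those records (objective: alternative decomposition, same cost).

-- ===== PORT A =====
-- one iteration of A's word loop over state (lines, positions, row, col, current_line)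
def stepA (width : Int) (s : List String × List (Int × Int) × Int × Int × List Char)
    (word : String) : List String × List (Int × Int) × Int × Int × List Char :=
  match s with
  | (lines, pos, row, col, cur) =>
    let wordLen : Int := word.toList.length
    let spaceLen : Int := if 0 < col then 1 else 0
    let (lines, pos, row, col, cur) :=
      if 0 < col ∧ width < col + spaceLen + wordLen then
        (lines ++ [String.ofList cur], pos ++ [(row + 1, (0 : Int))], row + 1, (0 : Int), ([] : List Char))
      else (lines, pos, row, col, cur)
    let (pos, col, cur) :=
      if 0 < col then (pos ++ [(row, col)], col + 1, cur ++ [' ']) else (pos, col, cur)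
    let (pos, col, cur) := word.toList.foldl
      (fun (t : List (Int × Int) × Int × List Char) ch =>
        (t.1 ++ [(row, t.2.1)], t.2.1 + 1, t.2.2 ++ [ch])) (pos, col, cur)
    (lines, pos, row, col, cur)

def layout_prompt_py (prompt : String) (width : Int) : List String × (List (Int × Int)) :=
  match ((PySem.Str.split? prompt " ").getD []).foldl (stepA width) ([], [], 0, 0, []) with
  | (lines, pos, _, _, cur) =>
    (if cur ≠ [] ∨ lines = [] then lines ++ [String.ofList cur] else lines, pos)

-- ===== PORT B =====
-- pass 1 of Source B: record (wrapped, spaced, row, start_col) per word, tracking (row, col)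
def stepB1 (width : Int) (s : List (Bool × Bool × Int × Int) × Int × Int)
    (word : String) : List (Bool × Bool × Int × Int) × Int × Int :=
  match s with
  | (recs, row, col) =>
    let wl : Int := word.toList.length
    let wrapped : Bool := decide (0 < col ∧ width < col + 1 + wl)
    let row := if wrapped then row + 1 else row
    let col := if wrapped then 0 else col
    let spaced : Bool := decide (0 < col)
    (recs ++ [(wrapped, spaced, row, col)], row, col + (if spaced then 1 else 0) + wl)

-- pass 2 of Source B: consume one (word, record) pair
def stepB2 (s : List String × List (Int × Int) × List Char)
    (p : String × Bool × Bool × Int × Int) : List String × List (Int × Int) × List Char :=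
  match s, p with
  | (lines, pos, cur), (word, wrapped, spaced, r, c0) =>
    let (lines, pos, cur) :=
      if wrapped then (lines ++ [String.ofList cur], pos ++ [(r, (0 : Int))], ([] : List Char))
      else (lines, pos, cur)
    let (cur, pos, base) :=
      if spaced then (cur ++ [' '], pos ++ [(r, c0)], c0 + 1) else (cur, pos, c0)
    let (cur, pos) := (PySem.List.enumerate word.toList 0).foldl
      (fun (t : List Char × List (Int × Int)) q =>
        (t.1 ++ [q.2], t.2 ++ [(r, base + q.1)])) (cur, pos)
    (lines, pos, cur)

def layout_prompt_py_alt (prompt : String) (width : Int) : List String × (List (Int × Int)) :=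
  let words := (PySem.Str.split? prompt " ").getD []
  match (words.zip ((words.foldl (stepB1 width) ([], 0, 0)).1)).foldl stepB2 ([], [], []) with
  | (lines, pos, cur) =>
    (if cur ≠ [] ∨ lines = [] then lines ++ [String.ofList cur] else lines, pos)

-- ===== PRECONDITION & SPEC =====
def Spec_layout_prompt_py (prompt : String) (width : Int) (out : List String × (List (Int × Int))) : Prop := out = layout_prompt_py_alt prompt width
instance (prompt : String) (width : Int) (out : List String × (List (Int × Int))) : Decidable (Spec_layout_prompt_py prompt width out) := by unfold Spec_layout_prompt_py; infer_instance

-- ===== CLAIM (what is proved, stated in full; the proofs are below) =====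
def Claim_equal_layout_prompt_py : Prop := ∀ (prompt : String) (width : Int), Dom_layout_prompt_py prompt width → Spec_layout_prompt_py prompt width (layout_prompt_py prompt width)

-- ===== LEMMAS AND PROOFS =====

-- the records pass 1 produces, as a structural recursion
def recsOf (width : Int) : List String → Int → Int → List (Bool × Bool × Int × Int)
  | [], _, _ => []
  | w :: ws, row, col =>
    let wl : Int := w.toList.length
    let wrapped : Bool := decide (0 < col ∧ width < col + 1 + wl)
    let row' := if wrapped then row + 1 else row
    let col' := if wrapped then 0 else col
    let spaced : Bool := decide (0 < col')
    (wrapped, spaced, row', col') :: recsOf width ws row' (col' + (if spaced then 1 else 0) + wl)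

def rcAfter (width : Int) : List String → Int → Int → Int × Int
  | [], row, col => (row, col)
  | w :: ws, row, col =>
    let wl : Int := w.toList.length
    let wrapped : Bool := decide (0 < col ∧ width < col + 1 + wl)
    let row' := if wrapped then row + 1 else row
    let col' := if wrapped then 0 else col
    let spaced : Bool := decide (0 < col')
    rcAfter width ws row' (col' + (if spaced then 1 else 0) + wl)

lemma pass1_eq (width : Int) : ∀ (ws : List String) (acc : List (Bool × Bool × Int × Int)) (row col : Int),
    ws.foldl (stepB1 width) (acc, row, col)
      = (acc ++ recsOf width ws row col, rcAfter width ws row col) := by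
  intro ws
  induction ws with
  | nil => intro acc row col; simp [recsOf, rcAfter]
  | cons w ws ih =>
    intro acc row col
    simp only [List.foldl_cons, stepB1, recsOf, rcAfter]
    rw [ih]
    simp

lemma chars_eq (r base : Int) : ∀ (l : List Char) (pos : List (Int × Int)) (cur : List Char) (k : Int),
    l.foldl (fun (t : List (Int × Int) × Int × List Char) ch =>
        (t.1 ++ [(r, t.2.1)], t.2.1 + 1, t.2.2 ++ [ch])) (pos, base + k, cur)
      = (((PySem.List.enumerate l k).foldl
            (fun (t : List Char × List (Int × Int)) q =>
              (t.1 ++ [q.2], t.2 ++ [(r, base + q.1)])) (cur, pos)).2,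
         base + k + l.length,
         ((PySem.List.enumerate l k).foldl
            (fun (t : List Char × List (Int × Int)) q =>
              (t.1 ++ [q.2], t.2 ++ [(r, base + q.1)])) (cur, pos)).1) := by
  intro l
  induction l with
  | nil => intro pos cur k; simp [PySem.List.enumerate_nil]
  | cons ch l ih =>
    intro pos cur k
    simp only [List.foldl_cons, PySem.List.enumerate_cons]
    have h : base + k + 1 = base + (k + 1) := by ring
    rw [h, ih]
    simp
    omega

lemma chars_eq0 (r c : Int) (l : List Char) (pos : List (Int × Int)) (cur : List Char) :
    l.foldl (fun (t : List (Int × Int) × Int × List Char) ch =>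
        (t.1 ++ [(r, t.2.1)], t.2.1 + 1, t.2.2 ++ [ch])) (pos, c, cur)
      = (((PySem.List.enumerate l 0).foldl
            (fun (t : List Char × List (Int × Int)) q =>
              (t.1 ++ [q.2], t.2 ++ [(r, c + q.1)])) (cur, pos)).2,
         c + l.length,
         ((PySem.List.enumerate l 0).foldl
            (fun (t : List Char × List (Int × Int)) q =>
              (t.1 ++ [q.2], t.2 ++ [(r, c + q.1)])) (cur, pos)).1) := by
  have h := chars_eq r c l pos cur 0
  simpa using h

lemma step_eq (width : Int) (w : String) (lines : List String) (pos : List (Int × Int))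
    (row col : Int) (cur : List Char) :
    stepA width (lines, pos, row, col, cur) w =
      (let wl : Int := w.toList.length
       let wrapped : Bool := decide (0 < col ∧ width < col + 1 + wl)
       let row' := if wrapped then row + 1 else row
       let col' := if wrapped then 0 else col
       let spaced : Bool := decide (0 < col')
       let z := stepB2 (lines, pos, cur) (w, wrapped, spaced, row', col')
       (z.1, z.2.1, row', col' + (if spaced then 1 else 0) + wl, z.2.2)) := by
  by_cases h1 : 0 < col
  · by_cases h2 : width < col + 1 + (w.toList.length : Int)
    · have h2' : width < col + 1 + (w.length : Int) := by simpa using h2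
      simp [stepA, stepB2, h1, h2', chars_eq0]
    · have h2' : ¬ width < col + 1 + (w.length : Int) := by simpa using h2
      simp [stepA, stepB2, h1, h2', chars_eq0]
  · simp [stepA, stepB2, h1, chars_eq0]

lemma loop_eq (width : Int) : ∀ (ws : List String) (lines : List String) (pos : List (Int × Int))
    (row col : Int) (cur : List Char),
    ws.foldl (stepA width) (lines, pos, row, col, cur)
      = (((ws.zip (recsOf width ws row col)).foldl stepB2 (lines, pos, cur)).1,
         ((ws.zip (recsOf width ws row col)).foldl stepB2 (lines, pos, cur)).2.1,
         (rcAfter width ws row col).1,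
         (rcAfter width ws row col).2,
         ((ws.zip (recsOf width ws row col)).foldl stepB2 (lines, pos, cur)).2.2) := by
  intro ws
  induction ws with
  | nil => intro lines pos row col cur; simp [recsOf, rcAfter]
  | cons w ws ih =>
    intro lines pos row col cur
    simp only [List.foldl_cons, recsOf, rcAfter, List.zip_cons_cons]
    rw [step_eq]
    exact ih _ _ _ _ _

theorem lemma_final (prompt : String) (width : Int) :
    layout_prompt_py prompt width = layout_prompt_py_alt prompt width := by
  unfold layout_prompt_py layout_prompt_py_alt
  generalize (PySem.Str.split? prompt " ").getD [] = ws
  rw [loop_eq]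
  simp only [pass1_eq]
  simp

-- ===== VERDICT (by name: the statement is the Claim_ definition above) =====
theorem layout_prompt_py_spec : Claim_equal_layout_prompt_py := by
  intro prompt width _
  unfold Spec_layout_prompt_py
  exact lemma_final prompt width
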